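-- pv_equiv track=rewrite | github.com/krdpk17/cs-interview | 1048. Longest String Chain.py | is_successor
-- ===== SOURCE A (Python) =====
-- def is_successor(pre_word, next_word):
--     pre_word_size = len(pre_word)
--     next_word_size = len(next_word)
--     i = 0
--     j = 0
--     if(pre_word_size != next_word_size - 1):
--         return False
--
--     diff_buffer = 1
--     while(i < pre_word_size):
--         if(pre_word[i] != next_word[j]):
--             j = j + 1
--             if(diff_buffer == 0):
--                 return False
--             diff_buffer = diff_buffer - 1
--         else:
--             i = i + 1
--             j = j + 1
--
--     return True
-- ===== SOURCE B (Python) =====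
-- def is_successor(pre_word, next_word):
--     if len(pre_word) != len(next_word) - 1:
--         return False
--     p = 0
--     while p < len(pre_word) and pre_word[p] == next_word[p]:
--         p += 1
--     return pre_word[p:] == next_word[p + 1:]
-- ===== Notes on version B (the rewrite author's own statement) =====
-- stated objective: simpler
-- what changed: Replaces the two-pointer loop with a diff-buffer counter by a common-prefix scan followed by a single suffix slice comparison (drop the inserted character at the first mismatch).
import Mathlib
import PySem

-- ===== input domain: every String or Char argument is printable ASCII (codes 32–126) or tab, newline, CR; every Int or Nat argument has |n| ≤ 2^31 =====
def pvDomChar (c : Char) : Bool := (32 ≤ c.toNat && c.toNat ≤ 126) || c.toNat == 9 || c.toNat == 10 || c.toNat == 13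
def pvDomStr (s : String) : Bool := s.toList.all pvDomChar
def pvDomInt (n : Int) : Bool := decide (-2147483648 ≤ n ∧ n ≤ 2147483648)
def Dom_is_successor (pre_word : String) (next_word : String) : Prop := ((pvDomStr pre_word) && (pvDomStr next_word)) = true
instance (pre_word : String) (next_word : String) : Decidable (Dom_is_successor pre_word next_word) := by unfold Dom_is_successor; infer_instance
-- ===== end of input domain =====

-- B replaces A's two-pointer diff-buffer loop by a common-prefix scan plus one suffix
-- slice comparison; same O(n) cost, simpler decomposition.

-- ===== PORT A =====
-- A's while loop: i indexes pre, j indexes next; on mismatch only j advances and the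
-- single diff_buffer is spent. Transcribed as recursion on the two suffix lists
-- (advancing j = dropping next's head; advancing i and j = dropping both heads).
-- The ([], p::ps) case is unreachable in Python after the length guard (Python would
-- raise IndexError there); the `false` is only a totality guard.
def isSuccLoopA : List Char → List Char → Nat → Bool
  | [], _, _ => true
  | _ :: _, [], _ => false
  | p :: ps, n :: ns, buf =>
    if p ≠ n then
      if buf = 0 then false else isSuccLoopA (p :: ps) ns (buf - 1)
    else
      isSuccLoopA ps ns buf

def is_successor (pre_word : String) (next_word : String) : Bool :=
  -- Python's `pre_word_size != next_word_size - 1` over ints (so 0 - 1 = -1)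
  if (pre_word.toList.length : Int) ≠ (next_word.toList.length : Int) - 1 then false
  else isSuccLoopA pre_word.toList next_word.toList 1

-- ===== PORT B =====
-- Source B's `while p < len(pre_word) and pre_word[p] == next_word[p]: p += 1`
def prefixLenB : List Char → List Char → Nat
  | p :: ps, n :: ns => if p = n then prefixLenB ps ns + 1 else 0
  | _, _ => 0

def is_successor_alt (pre_word : String) (next_word : String) : Bool :=
  if (pre_word.toList.length : Int) ≠ (next_word.toList.length : Int) - 1 then false
  else
    let p := prefixLenB pre_word.toList next_word.toList
    -- pre_word[p:] == next_word[p+1:] ; with p ≥ 0 these slices are exactly `drop`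
    decide (pre_word.toList.drop p = next_word.toList.drop (p + 1))

-- ===== PRECONDITION & SPEC =====
def Spec_is_successor (pre_word : String) (next_word : String) (out : Bool) : Prop := out = is_successor_alt pre_word next_word
instance (pre_word : String) (next_word : String) (out : Bool) : Decidable (Spec_is_successor pre_word next_word out) := by unfold Spec_is_successor; infer_instance

-- ===== CLAIM (what is proved, stated in full; the proofs are below) =====
def Claim_equal_is_successor : Prop := ∀ (pre_word : String) (next_word : String), Dom_is_successor pre_word next_word → Spec_is_successor pre_word next_word (is_successor pre_word next_word)

-- ===== LEMMAS AND PROOFS =====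

-- After the buffer is spent, A's loop demands the suffixes be equal.
theorem loopA_zero (ps ns : List Char) (h : ns.length = ps.length) :
    isSuccLoopA ps ns 0 = decide (ps = ns) := by
  induction ps generalizing ns with
  | nil => cases ns with
    | nil => simp [isSuccLoopA]
    | cons n ns => simp at h
  | cons p ps ih =>
    cases ns with
    | nil => simp at h
    | cons n ns =>
      simp only [List.length_cons, Nat.succ.injEq] at h
      by_cases hpn : p = n
      · subst hpn
        simp [isSuccLoopA, ih ns h]
      · simp [isSuccLoopA, hpn]

theorem loopA_one (ps ns : List Char) (h : ns.length = ps.length + 1) :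
    isSuccLoopA ps ns 1 =
      decide (ps.drop (prefixLenB ps ns) = ns.drop (prefixLenB ps ns + 1)) := by
  induction ps generalizing ns with
  | nil =>
    cases ns with
    | nil => simp at h
    | cons n ns =>
      simp only [List.length_cons, Nat.succ.injEq, List.length_nil] at h
      have : ns = [] := List.eq_nil_of_length_eq_zero h
      subst this
      simp [isSuccLoopA, prefixLenB]
  | cons p ps ih =>
    cases ns with
    | nil => simp at h
    | cons n ns =>
      simp only [List.length_cons, Nat.succ.injEq] at h
      by_cases hpn : p = n
      · subst hpn
        simp [isSuccLoopA, prefixLenB, ih ns h]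
      · simp [isSuccLoopA, hpn, prefixLenB, loopA_zero (p :: ps) ns (by simpa using h)]

-- ===== VERDICT (by name: the statement is the Claim_ definition above) =====
theorem is_successor_spec : Claim_equal_is_successor := by
  intro pre next _
  unfold Spec_is_successor is_successor is_successor_alt
  split_ifs with hl
  · rfl
  · rw [not_not] at hl
    exact loopA_one pre.toList next.toList (by omega)
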